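-- pv_equiv track=rewrite | github.com/g-s01/data-programming-btp | gautam-results-and-analysis/raw-to-fine-direct/through-lfs/context-window-one/lfs_for_raw_sentence_gpt.py | label_sentence_CreativeWorks_MusicalWork
-- ===== SOURCE A (Python) =====
-- ABSTAIN = -1
--
-- CreativeWorks_MusicalWork = 19
--
-- def label_sentence_CreativeWorks_MusicalWork(tokens):
--     """
--     Labels each token in a sentence as CreativeWorks_MusicalWork if it indicates a musical work such as a song, composition, or musical piece.
--     Returns ABSTAIN for tokens that do not match the category.
--
--     Args:
--     tokens: list of str - A list of words representing a sentence.
--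
--     Returns:
--     list of str - A list of labels for each token.
--     """
--     # Common musical work indicators
--     musical_work_titles = {
--         'song', 'album', 'composition', 'concerto', 'opera', 'symphony', 'cantata', 'sonata',
--         'ballad', 'anthem', 'aria', 'suite', 'overture', 'march', 'nocturne', 'waltz', 'rhapsody',
--         'scherzo', 'fugue', 'prelude', 'toccata', 'fantasia', 'carol', 'melody', 'tune', 'score',
--         'piece', 'chorale', 'oratorio', 'track'
--     }
--     musical_work_indicators = {
--         'vocals', 'lyrics', 'album', 'track', 'composition', 'song', 'anthem', 'aria', 'march',
--         'nocturne', 'overture', 'suite', 'symphony', 'ballad', 'piece', 'melody', 'chorale', 'score',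
--         'opera', 'cantata', 'concert', 'music', 'recording', 'version', 'oratorio', 'prelude'
--     }
--     musical_context = {
--         'written', 'performed', 'sings', 'composed', 'featuring', 'includes', 'from', 'in', 'recorded',
--         'covered', 'released', 'soundtrack', 'album', 'single', 'track'
--     }
--
--     labels = []
--
--     for i, token in enumerate(tokens):
--         token_lower = token.lower()
--
--         # Check if the token or surrounding tokens suggest a musical work
--         if (
--             token_lower in musical_work_indicators and (  # The token itself indicates a musical work
--             token_lower in musical_work_titles or  # Specific musical work titles
--             (i > 0 and tokens[i - 1].lower() in musical_work_indicators) or  # Preceded by a musical work indicator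
--             (i < len(tokens) - 1 and tokens[i + 1].lower() in musical_work_indicators) or  # Followed by a musical work indicator
--             (i > 0 and tokens[i - 1].lower() in musical_context) or  # Preceded by a musical context keyword
--             (i < len(tokens) - 1 and tokens[i + 1].lower() in musical_context))  # Followed by a musical context keyword
--         ):
--             labels.append(CreativeWorks_MusicalWork)
--         else:
--             labels.append(ABSTAIN)  # Default to 'O' if no match is found
--
--     return labels
-- ===== SOURCE B (Python) =====
-- ABSTAIN = -1
-- CreativeWorks_MusicalWork = 19
--
-- def label_sentence_CreativeWorks_MusicalWork(tokens):
--     musical_work_titles = {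
--         'song', 'album', 'composition', 'concerto', 'opera', 'symphony', 'cantata', 'sonata',
--         'ballad', 'anthem', 'aria', 'suite', 'overture', 'march', 'nocturne', 'waltz', 'rhapsody',
--         'scherzo', 'fugue', 'prelude', 'toccata', 'fantasia', 'carol', 'melody', 'tune', 'score',
--         'piece', 'chorale', 'oratorio', 'track'
--     }
--     musical_work_indicators = {
--         'vocals', 'lyrics', 'album', 'track', 'composition', 'song', 'anthem', 'aria', 'march',
--         'nocturne', 'overture', 'suite', 'symphony', 'ballad', 'piece', 'melody', 'chorale', 'score',
--         'opera', 'cantata', 'concert', 'music', 'recording', 'version', 'oratorio', 'prelude'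
--     }
--     musical_context = {
--         'written', 'performed', 'sings', 'composed', 'featuring', 'includes', 'from', 'in', 'recorded',
--         'covered', 'released', 'soundtrack', 'album', 'single', 'track'
--     }
--     # Scatter algorithm: instead of each position inspecting its neighbours (gather),
--     # every cue token MARKS its neighbours in an eligibility table; a title marks its
--     # own position.  A final pass labels the positions that are indicators and marked.
--     n = len(tokens)
--     lows = [t.lower() for t in tokens]
--     eligible = [False] * n
--     for j, w in enumerate(lows):
--         if w in musical_work_titles:
--             eligible[j] = True
--         if w in musical_work_indicators or w in musical_context:
--             if j > 0:
--                 eligible[j - 1] = True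
--             if j + 1 < n:
--                 eligible[j + 1] = True
--     return [CreativeWorks_MusicalWork if w in musical_work_indicators and eligible[i]
--             else ABSTAIN
--             for i, w in enumerate(lows)]
-- ===== Notes on version B (the rewrite author's own statement) =====
-- stated objective: alternative
-- what changed: B inverts the dataflow: instead of each token inspecting its neighbours (gather), it builds an eligibility table by having every cue token mark its two neighbours and every title mark its own slot (scatter with random-access writes), then labels positions that are indicators and marked.
import Mathlib
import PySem

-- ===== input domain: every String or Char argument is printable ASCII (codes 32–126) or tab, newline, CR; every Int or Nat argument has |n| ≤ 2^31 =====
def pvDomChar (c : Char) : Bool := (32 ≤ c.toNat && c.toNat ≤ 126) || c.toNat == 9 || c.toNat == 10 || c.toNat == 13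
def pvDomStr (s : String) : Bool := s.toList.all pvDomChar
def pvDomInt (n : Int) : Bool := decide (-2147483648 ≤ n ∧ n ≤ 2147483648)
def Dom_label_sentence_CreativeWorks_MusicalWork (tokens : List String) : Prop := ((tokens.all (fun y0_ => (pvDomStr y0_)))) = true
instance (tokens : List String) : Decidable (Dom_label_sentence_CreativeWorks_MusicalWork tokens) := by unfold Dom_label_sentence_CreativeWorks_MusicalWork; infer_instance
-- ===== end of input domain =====

-- B inverts the dataflow (scatter instead of gather): every cue token marks its two
-- neighbours in an eligibility table and every title marks its own slot, then one pass
-- labels the marked indicator positions; same output as A's neighbour-inspecting loop.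

-- ===== PORT A =====
def pvTitles : List String :=
  ["song", "album", "composition", "concerto", "opera", "symphony", "cantata", "sonata",
   "ballad", "anthem", "aria", "suite", "overture", "march", "nocturne", "waltz", "rhapsody",
   "scherzo", "fugue", "prelude", "toccata", "fantasia", "carol", "melody", "tune", "score",
   "piece", "chorale", "oratorio", "track"]
def pvIndicators : List String :=
  ["vocals", "lyrics", "album", "track", "composition", "song", "anthem", "aria", "march",
   "nocturne", "overture", "suite", "symphony", "ballad", "piece", "melody", "chorale", "score",
   "opera", "cantata", "concert", "music", "recording", "version", "oratorio", "prelude"]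
def pvContext : List String :=
  ["written", "performed", "sings", "composed", "featuring", "includes", "from", "in", "recorded",
   "covered", "released", "soundtrack", "album", "single", "track"]

def label_sentence_CreativeWorks_MusicalWork (tokens : List String) : List Int :=
  (PySem.List.enumerate tokens 0).foldl
    (fun labels p =>
      let i : Int := p.1
      let token_lower := PySem.Str.lower p.2
      if token_lower ∈ pvIndicators ∧
         (token_lower ∈ pvTitles ∨
          (i > 0 ∧ PySem.Str.lower (PySem.List.pyGetD tokens (i - 1) "") ∈ pvIndicators) ∨
          (i < (tokens.length : Int) - 1 ∧ PySem.Str.lower (PySem.List.pyGetD tokens (i + 1) "") ∈ pvIndicators) ∨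
          (i > 0 ∧ PySem.Str.lower (PySem.List.pyGetD tokens (i - 1) "") ∈ pvContext) ∨
          (i < (tokens.length : Int) - 1 ∧ PySem.Str.lower (PySem.List.pyGetD tokens (i + 1) "") ∈ pvContext))
      then labels ++ [(19 : Int)]
      else labels ++ [(-1 : Int)])
    []

-- ===== PORT B =====
-- `w in musical_work_indicators or w in musical_context`
def pvCue (w : String) : Bool := decide (w ∈ pvIndicators) || decide (w ∈ pvContext)

-- one iteration of B's marking loop over (w, j) = enumerate(lows); List.set is exact for
-- Python's `eligible[k] = True` because B's writes are always guarded in range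
def pvMark (n : Nat) (e : List Bool) (q : String × Nat) : List Bool :=
  let e1 := if q.1 ∈ pvTitles then e.set q.2 true else e
  if pvCue q.1 then
    let e2 := if 0 < q.2 then e1.set (q.2 - 1) true else e1
    if q.2 + 1 < n then e2.set (q.2 + 1) true else e2
  else e1

def label_sentence_CreativeWorks_MusicalWork_alt (tokens : List String) : List Int :=
  let n := tokens.length
  let lows := tokens.map PySem.Str.lower
  let eligible := lows.zipIdx.foldl (pvMark n) (List.replicate n false)
  lows.zipIdx.map (fun q =>
    if q.1 ∈ pvIndicators ∧ eligible.getD q.2 false = true then (19 : Int) else (-1 : Int))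

-- ===== PRECONDITION & SPEC =====
def Spec_label_sentence_CreativeWorks_MusicalWork (tokens : List String) (out : List Int) : Prop := out = label_sentence_CreativeWorks_MusicalWork_alt tokens
instance (tokens : List String) (out : List Int) : Decidable (Spec_label_sentence_CreativeWorks_MusicalWork tokens out) := by unfold Spec_label_sentence_CreativeWorks_MusicalWork; infer_instance

-- ===== CLAIM (what is proved, stated in full; the proofs are below) =====
def Claim_equal_label_sentence_CreativeWorks_MusicalWork : Prop := ∀ (tokens : List String), Dom_label_sentence_CreativeWorks_MusicalWork tokens → Spec_label_sentence_CreativeWorks_MusicalWork tokens (label_sentence_CreativeWorks_MusicalWork tokens)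

-- ===== LEMMAS AND PROOFS =====

-- the per-index contribution one marking step makes to position i
def pvContrib (n : Nat) (q : String × Nat) (i : Nat) : Bool :=
  (decide (q.2 = i) && decide (q.1 ∈ pvTitles)) ||
  (pvCue q.1 && ((decide (0 < q.2) && decide (q.2 - 1 = i)) ||
                 (decide (q.2 + 1 < n) && decide (q.2 + 1 = i))))

theorem pv_getD_set (l : List Bool) (k i : Nat) (hk : k < l.length) :
    ((l.set k true))[i]?.getD false = (decide (k = i) || l[i]?.getD false) := by
  rw [List.getElem?_set]
  by_cases h1 : k = i
  · subst h1; simp [hk]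
  · simp [h1]

theorem pv_mark_length (n : Nat) (e : List Bool) (q : String × Nat) :
    (pvMark n e q).length = e.length := by
  unfold pvMark
  split_ifs <;> simp

theorem pv_mark_getD (n : Nat) (e : List Bool) (he : e.length = n)
    (q : String × Nat) (hq : q.2 < n) (i : Nat) :
    (pvMark n e q).getD i false = (e.getD i false || pvContrib n q i) := by
  have Lm : q.2 - 1 < n := by omega
  unfold pvMark pvContrib
  by_cases ht : q.1 ∈ pvTitles <;> by_cases hc : pvCue q.1 = true <;>
    by_cases h0 : 0 < q.2 <;> by_cases h1 : q.2 + 1 < n <;>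
    simp [ht, hc, h0, h1, pv_getD_set, he, hq, Lm,
          Bool.or_assoc, Bool.or_comm, Bool.or_left_comm]

theorem pv_foldl_mark (n : Nat) (ps : List (String × Nat)) (hps : ∀ q ∈ ps, q.2 < n) :
    ∀ (e : List Bool), e.length = n → ∀ (i : Nat),
    ((ps.foldl (pvMark n) e).getD i false) =
      (e.getD i false || ps.any (fun q => pvContrib n q i)) := by
  induction ps with
  | nil => intro e he i; simp
  | cons x xs ih =>
    intro e he i
    simp only [List.foldl_cons, List.any_cons]
    rw [ih (fun q hq => hps q (List.mem_cons_of_mem x hq)) _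
       (by rw [pv_mark_length, he]) i]
    rw [pv_mark_getD n e he x (hps x (List.mem_cons_self)) i]
    simp [Bool.or_assoc]

theorem pv_any_zipIdx (lows : List String) (n : Nat) (hn : n = lows.length) (i : Nat) (hi : i < n) :
    (lows.zipIdx.any (fun q => pvContrib n q i)) =
      (decide (lows[i]'(hn ▸ hi) ∈ pvTitles) ||
       (decide (0 < i) && pvCue (lows.getD (i - 1) "")) ||
       (decide (i + 1 < n) && pvCue (lows.getD (i + 1) ""))) := by
  subst hn
  apply Bool.coe_iff_coe.mp
  rw [List.any_eq_true]
  constructor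
  · rintro ⟨q, hq, hpq⟩
    have hmem := List.mem_zipIdx_iff_getElem?.mp hq
    have hlt : q.2 < lows.length := by
      by_contra h
      rw [List.getElem?_eq_none (le_of_not_gt h)] at hmem
      simp at hmem
    have hv : q.1 = lows[q.2] := by
      rw [List.getElem?_eq_getElem hlt] at hmem
      exact (Option.some.inj hmem).symm
    unfold pvContrib at hpq
    simp only [Bool.or_eq_true, Bool.and_eq_true, decide_eq_true_iff] at hpq ⊢
    rcases hpq with ⟨hqi, ht⟩ | ⟨hcue, ⟨h0, hpi⟩ | ⟨h1, hni⟩⟩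
    · subst hqi; rw [hv] at ht; exact Or.inl (Or.inl ht)
    · -- the cue is at q.2 = i + 1, to the right of i
      refine Or.inr ⟨by omega, ?_⟩
      rw [show i + 1 = q.2 by omega, List.getD_eq_getElem lows "" hlt, ← hv]
      exact hcue
    · -- the cue is at q.2 = i - 1, to the left of i
      refine Or.inl (Or.inr ⟨by omega, ?_⟩)
      rw [show i - 1 = q.2 by omega, List.getD_eq_getElem lows "" hlt, ← hv]
      exact hcue
  · intro h
    simp only [Bool.or_eq_true, Bool.and_eq_true, decide_eq_true_iff] at h
    rcases h with (ht | ⟨h0, hp⟩) | ⟨h1, hn'⟩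
    · refine ⟨(lows[i], i), List.mem_zipIdx_iff_getElem?.mpr (by simp), ?_⟩
      unfold pvContrib; simp [ht]
    · have hlt : i - 1 < lows.length := by omega
      refine ⟨(lows[i-1], i - 1), List.mem_zipIdx_iff_getElem?.mpr (by simp [hlt]), ?_⟩
      unfold pvContrib
      rw [List.getD_eq_getElem lows "" hlt] at hp
      simp [hp]
      omega
    · have hlt : i + 1 < lows.length := h1
      refine ⟨(lows[i+1], i + 1), List.mem_zipIdx_iff_getElem?.mpr (by simp [hlt]), ?_⟩
      unfold pvContrib
      rw [List.getD_eq_getElem lows "" hlt] at hn'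
      simp [hn']

theorem pv_equal (tokens : List String) :
    label_sentence_CreativeWorks_MusicalWork tokens = label_sentence_CreativeWorks_MusicalWork_alt tokens := by
  unfold label_sentence_CreativeWorks_MusicalWork label_sentence_CreativeWorks_MusicalWork_alt
  simp only []
  have hA : ∀ (l : List (Int × String)) (acc : List Int),
      l.foldl (fun labels p =>
        let i : Int := p.1
        let token_lower := PySem.Str.lower p.2
        if token_lower ∈ pvIndicators ∧
           (token_lower ∈ pvTitles ∨
            (i > 0 ∧ PySem.Str.lower (PySem.List.pyGetD tokens (i - 1) "") ∈ pvIndicators) ∨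
            (i < (tokens.length : Int) - 1 ∧ PySem.Str.lower (PySem.List.pyGetD tokens (i + 1) "") ∈ pvIndicators) ∨
            (i > 0 ∧ PySem.Str.lower (PySem.List.pyGetD tokens (i - 1) "") ∈ pvContext) ∨
            (i < (tokens.length : Int) - 1 ∧ PySem.Str.lower (PySem.List.pyGetD tokens (i + 1) "") ∈ pvContext))
        then labels ++ [(19 : Int)]
        else labels ++ [(-1 : Int)]) acc
      = acc ++ l.map (fun p =>
          if PySem.Str.lower p.2 ∈ pvIndicators ∧
             (PySem.Str.lower p.2 ∈ pvTitles ∨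
              (p.1 > 0 ∧ PySem.Str.lower (PySem.List.pyGetD tokens (p.1 - 1) "") ∈ pvIndicators) ∨
              (p.1 < (tokens.length : Int) - 1 ∧ PySem.Str.lower (PySem.List.pyGetD tokens (p.1 + 1) "") ∈ pvIndicators) ∨
              (p.1 > 0 ∧ PySem.Str.lower (PySem.List.pyGetD tokens (p.1 - 1) "") ∈ pvContext) ∨
              (p.1 < (tokens.length : Int) - 1 ∧ PySem.Str.lower (PySem.List.pyGetD tokens (p.1 + 1) "") ∈ pvContext))
          then (19 : Int) else (-1 : Int)) := by
    intro l
    induction l with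
    | nil => intro acc; simp
    | cons x xs ih =>
      intro acc
      simp only [List.foldl_cons, List.map_cons]
      rw [ih]
      split <;> simp
  rw [hA]
  simp only [List.nil_append]
  apply List.ext_getElem
  · simp [PySem.List.length_enumerate]
  · intro i h1 h2
    have hn : i < tokens.length := by
      simpa [PySem.List.length_enumerate] using h1
    have hlow : i < (tokens.map PySem.Str.lower).length := by simpa using hn
    simp only [List.getElem_map, PySem.List.getElem_enumerate, List.getElem_zipIdx]
    simp only [zero_add]
    rw [pv_foldl_mark tokens.length
          ((tokens.map PySem.Str.lower).zipIdx)
          (by intro q hq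
              have := List.mem_zipIdx_iff_getElem?.mp hq
              by_contra h
              rw [List.getElem?_eq_none (by simpa using le_of_not_gt h)] at this
              simp at this)
          _ (by simp) i]
    rw [show (List.replicate tokens.length false).getD i false = false by
          simp [List.getD_eq_getElem?_getD, List.getElem?_replicate]
          split <;> rfl]
    simp only [Bool.false_or]
    rw [pv_any_zipIdx (tokens.map PySem.Str.lower) tokens.length (by simp) i hn]
    have keylow : ∀ k : Nat, (tokens.map PySem.Str.lower).getD k "" = PySem.Str.lower (tokens.getD k "") := by
      intro k
      by_cases hk : k < tokens.length
      · rw [List.getD_eq_getElem _ _ (by simpa using hk), List.getD_eq_getElem _ _ hk]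
        simp
      · rw [List.getD_eq_default _ _ (by simpa using le_of_not_gt hk),
            List.getD_eq_default _ _ (le_of_not_gt hk)]
        rfl
    have key1 : 0 < i → PySem.List.pyGetD tokens ((i : Int) - 1) "" = tokens.getD (i - 1) "" := by
      intro hi
      have e : ((i : Int) - 1) = (((i - 1 : Nat) : Int)) := by omega
      rw [e, PySem.List.pyGetD_natCast]
    have key2 : PySem.List.pyGetD tokens ((i : Int) + 1) "" = tokens.getD (i + 1) "" := by
      have e : ((i : Int) + 1) = (((i + 1 : Nat) : Int)) := by omega
      rw [e, PySem.List.pyGetD_natCast]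
    have hget : (tokens.map PySem.Str.lower)[i]'hlow = PySem.Str.lower (tokens[i]'hn) := by simp
    refine if_congr ?_ rfl rfl
    rw [hget]
    simp only [pvCue, keylow, Bool.or_eq_true, Bool.and_eq_true, decide_eq_true_iff]
    constructor
    · rintro ⟨hind, hrest⟩
      refine ⟨hind, ?_⟩
      rcases hrest with h | ⟨hg, hm⟩ | ⟨hg, hm⟩ | ⟨hg, hm⟩ | ⟨hg, hm⟩
      · exact Or.inl (Or.inl h)
      · have hi : 0 < i := by omega
        rw [key1 hi] at hm
        exact Or.inl (Or.inr ⟨hi, Or.inl hm⟩)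
      · rw [key2] at hm
        exact Or.inr ⟨by omega, Or.inl hm⟩
      · have hi : 0 < i := by omega
        rw [key1 hi] at hm
        exact Or.inl (Or.inr ⟨hi, Or.inr hm⟩)
      · rw [key2] at hm
        exact Or.inr ⟨by omega, Or.inr hm⟩
    · rintro ⟨hind, hrest⟩
      refine ⟨hind, ?_⟩
      rcases hrest with (h | ⟨hi, hm | hm⟩) | ⟨hi, hm | hm⟩
      · exact Or.inl h
      · exact Or.inr (Or.inl ⟨by omega, by rw [key1 hi]; exact hm⟩)
      · exact Or.inr (Or.inr (Or.inr (Or.inl ⟨by omega, by rw [key1 hi]; exact hm⟩)))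
      · exact Or.inr (Or.inr (Or.inl ⟨by omega, by rw [key2]; exact hm⟩))
      · exact Or.inr (Or.inr (Or.inr (Or.inr ⟨by omega, by rw [key2]; exact hm⟩)))

-- ===== VERDICT (by name: the statement is the Claim_ definition above) =====
theorem label_sentence_CreativeWorks_MusicalWork_spec : Claim_equal_label_sentence_CreativeWorks_MusicalWork := by
  intro tokens _
  exact pv_equal tokens
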